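-- pv_equiv track=rewrite | github.com/mlutx/cairn | cairn_utils/github_utils.py | get_directory_structure
-- ===== SOURCE A (Python) =====
-- def get_directory_structure(paths: list[str], include_full_paths: bool = True) -> str:
--     """
--     Given a list of file paths, return a string that represents the directory structure of the files.
--
--     For example, if the paths are: ['src/utils.py', 'src/main.py', 'src/config.py', 'test.txt']
--     The output will be:
--     src/
--     ├── utils.py
--     └── main.py
--     └── config.py
--     test.txt
--
--     If include_full_paths is True, the full path will be shown in parentheses after each file name.
--     """
--     if not paths:
--         return ""
--
--     # Build tree structure
--     tree = {}
--     path_mapping = {}  # Store the mapping between file names and their full paths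
--
--     for path in paths:
--         parts = path.split("/")
--         current = tree
--         for i, part in enumerate(parts):
--             if i == len(parts) - 1:  # Last part (file)
--                 if "_files" not in current:
--                     current["_files"] = []
--                 current["_files"].append(part)
--                 # Store the full path for this file
--                 path_key = "/".join(parts[:i]) + "/" + part if i > 0 else part
--                 path_mapping[path_key] = path
--             else:  # Directory
--                 if part not in current:
--                     current[part] = {}
--                 current = current[part]
--
--     # Generate string representation
--     result = []
--
--     def print_tree(node, prefix="", is_root=True, path_prefix=""):
--         # Print directories
--         dirs = sorted([k for k in node.keys() if k != "_files"])
--         files = sorted(node.get("_files", []))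
--
--         for i, dir_name in enumerate(dirs):
--             is_last_dir = i == len(dirs) - 1 and not files
--             result.append(f"{prefix}{'└── ' if is_last_dir else '├── '}{dir_name}/")
--             new_prefix = f"{prefix}{'    ' if is_last_dir else '│   '}"
--             new_path_prefix = (
--                 f"{path_prefix}{dir_name}/" if path_prefix else f"{dir_name}/"
--             )
--             print_tree(node[dir_name], new_prefix, False, new_path_prefix)
--
--         # Print files
--         for i, file_name in enumerate(files):
--             is_last = i == len(files) - 1
--             file_path = f"{path_prefix}{file_name}" if path_prefix else file_name
--
--             # Add full path in parentheses if requested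
--             if include_full_paths and file_path in path_mapping:
--                 result.append(
--                     f"{prefix}{'└── ' if is_last else '├── '}{file_name} (path: {path_mapping[file_path]})"
--                 )
--             else:
--                 result.append(f"{prefix}{'└── ' if is_last else '├── '}{file_name}")
--
--     # Handle root level files first
--     root_files = []
--     root_dirs = {}
--
--     for k, v in tree.items():
--         if k == "_files":
--             root_files = sorted(v)
--         else:
--             root_dirs[k] = v
--
--     # Print the structure for root directories
--     for i, dir_name in enumerate(sorted(root_dirs.keys())):
--         is_last_dir = i == len(root_dirs) - 1 and not root_files
--         result.append(f"{'└── ' if is_last_dir else '├── '}{dir_name}/")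
--         new_prefix = f"{'    ' if is_last_dir else '│   '}"
--         print_tree(root_dirs[dir_name], new_prefix, False, f"{dir_name}/")
--
--     # Print root level files
--     for i, file_name in enumerate(root_files):
--         is_last = i == len(root_files) - 1
--         # Add full path in parentheses if requested
--         if include_full_paths and file_name in path_mapping:
--             result.append(
--                 f"{'└── ' if is_last else '├── '}{file_name} (path: {path_mapping[file_name]})"
--             )
--         else:
--             result.append(f"{'└── ' if is_last else '├── '}{file_name}")
--
--     return "\n".join(result)
-- ===== SOURCE B (Python) =====
-- def get_directory_structure(paths: list[str], include_full_paths: bool = True) -> str: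
--     """Recursive partition of the split paths: no intermediate tree dict and no
--     path_mapping — the full path of a file is reconstructed as path_prefix + name."""
--     if not paths:
--         return ""
--
--     def render(entries, prefix, path_prefix):
--         files = sorted(e[0] for e in entries if len(e) == 1)
--         dirs = sorted({e[0] for e in entries if len(e) > 1})
--         lines = []
--         for i, d in enumerate(dirs):
--             last = i == len(dirs) - 1 and not files
--             lines.append(prefix + ("└── " if last else "├── ") + d + "/")
--             lines += render(
--                 [e[1:] for e in entries if len(e) > 1 and e[0] == d],
--                 prefix + ("    " if last else "│   "),
--                 path_prefix + d + "/",
--             )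
--         for i, f in enumerate(files):
--             last = i == len(files) - 1
--             line = prefix + ("└── " if last else "├── ") + f
--             if include_full_paths:
--                 line += " (path: " + path_prefix + f + ")"
--             lines.append(line)
--         return lines
--
--     return "\n".join(render([p.split("/") for p in paths], "", ""))
-- ===== Notes on version B (the rewrite author's own statement) =====
-- stated objective: simpler
-- what changed: A's nested-dict tree build with a '_files' sentinel, a path_mapping dict, a recursive print_tree and a duplicated root-level loop are all replaced by one recursive function that partitions the split path lists level by level (files = singleton entries, dirs = distinct heads of longer entries) and reconstructs each file's full path as path_prefix + name instead of looking it up.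
import Mathlib
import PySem

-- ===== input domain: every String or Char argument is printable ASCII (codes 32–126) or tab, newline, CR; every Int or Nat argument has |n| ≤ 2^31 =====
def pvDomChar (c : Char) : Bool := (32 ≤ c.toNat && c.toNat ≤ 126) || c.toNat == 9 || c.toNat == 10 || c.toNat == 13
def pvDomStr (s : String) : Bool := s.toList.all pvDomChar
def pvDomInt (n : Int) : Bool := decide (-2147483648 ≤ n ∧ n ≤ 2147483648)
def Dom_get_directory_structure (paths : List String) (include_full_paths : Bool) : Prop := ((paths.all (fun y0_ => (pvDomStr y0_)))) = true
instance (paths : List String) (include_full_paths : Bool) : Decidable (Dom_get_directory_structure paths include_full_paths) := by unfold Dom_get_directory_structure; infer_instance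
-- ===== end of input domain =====

-- B replaces A's whole pipeline (nested tree dict with a "_files" sentinel, a path_mapping
-- dict, a recursive print_tree plus a duplicated root-level loop) by one recursive function
-- that partitions the split path lists level by level and reconstructs each file's full path
-- as path_prefix + name.

-- ===== PORT A =====

-- The Python tree is a nested dict whose "_files" key holds the list of file names and whose
-- other keys hold sub-dicts.  We model a node as (files, children) in insertion order; Pre_
-- excludes paths with "_files" as a directory component, where the sentinel collides with data.
mutual
inductive DTree : Type
  | node : List String → DForest → DTree
inductive DForest : Type
  | nil : DForest
  | cons : String → DTree → DForest → DForest
end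

mutual
def DTree.sz : DTree → Nat
  | .node fs cs => DForest.szF cs + fs.length + 1
def DForest.szF : DForest → Nat
  | .nil => 0
  | .cons _ t r => DTree.sz t + DForest.szF r + 1
end

def DForest.keys : DForest → List String
  | .nil => []
  | .cons k _ r => k :: r.keys

-- dict lookup node[d] (first match)
def DForest.find : DForest → String → Option DTree
  | .nil, _ => none
  | .cons k t r, d => if k = d then some t else r.find d

def DTree.filesOf : DTree → List String
  | .node fs _ => fs

def DTree.kidsOf : DTree → DForest
  | .node _ cs => cs

-- path.split("/")  ("/" is a nonempty separator, so split? never returns none)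
def pySplit (s : String) : List String := (PySem.Str.split? s "/").getD []

-- descend into (or create) current[part]: 'if part not in current: current[part] = {}; current = current[part]'
def updateForest : DForest → String → (DTree → DTree) → DForest
  | .nil, p, u => .cons p (u (.node [] .nil)) .nil
  | .cons k t r, p, u =>
    if k = p then .cons k (u t) r
    else .cons k t (updateForest r p u)

-- the inner 'for i, part in enumerate(parts)' walk of the build loop
def insertPath : DTree → List String → DTree
  | t, [] => t        -- unreachable: str.split("/") is never empty
  | .node fs cs, [p] => .node (fs ++ [p]) cs                          -- current["_files"].append(part)
  | .node fs cs, p :: q :: rest => .node fs (updateForest cs p (fun c => insertPath c (q :: rest)))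

-- 'for path in paths' of the build loop
def buildTree (paths : List String) : DTree :=
  paths.foldl (fun t p => insertPath t (pySplit p)) (.node [] .nil)

-- path_mapping build: path_key = "/".join(parts[:i]) + "/" + part if i > 0 else part, at i = len-1
def buildMapping (paths : List String) : PySem.Dict String String :=
  paths.foldl
    (fun d p =>
      let parts := pySplit p
      let key :=
        if parts.length - 1 > 0 then
          PySem.Str.join "/" (parts.take (parts.length - 1)) ++ "/" ++ parts.getD (parts.length - 1) ""
        else parts.getD 0 ""
      d.insert key p)
    PySem.Dict.empty

-- print_tree's trailing file loop (result.append per file; m[fp] indexed only after 'fp in m')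
def renderFiles : List String → String → String → PySem.Dict String String → Bool → List String
  | [], _, _, _, _ => []
  | f :: rest, pfx, ppfx, m, incl =>
    let isLast := rest.isEmpty
    let fp := if ppfx ≠ "" then ppfx ++ f else f
    (if incl && m.contains fp then
        pfx ++ (if isLast then "└── " else "├── ") ++ f ++ " (path: " ++ m.getD fp "" ++ ")"
      else pfx ++ (if isLast then "└── " else "├── ") ++ f) :: renderFiles rest pfx ppfx m incl

-- print_tree's dirs loop, abstracted over the recursive call (recursing into node[dir_name];
-- find = some is guaranteed for d ∈ keys)
def renderDirsH (recT : DTree → String → String → List String) :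
    DForest → List String → List String → String → String → List String
  | _, [], _, _, _ => []
  | cs, d :: ds, files, pfx, ppfx =>
    let isLast := ds.isEmpty && files.isEmpty
    (pfx ++ (if isLast then "└── " else "├── ") ++ d ++ "/") ::
      ((match cs.find d with
        | some t =>
          recT t (pfx ++ (if isLast then "    " else "│   "))
            (if ppfx ≠ "" then ppfx ++ d ++ "/" else d ++ "/")
        | none => []) ++ renderDirsH recT cs ds files pfx ppfx)

-- print_tree: dirs loop then files loop; the Nat fuel only makes the recursion structural
-- (any fuel ≥ the node's size computes the Python recursion)
def printTree : Nat → DTree → String → String → PySem.Dict String String → Bool → List String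
  | 0, _, _, _, _, _ => []    -- unreachable when fuel ≥ tree size
  | fuel + 1, .node fs cs, pfx, ppfx, m, incl =>
    renderDirsH (fun t pfx' ppfx' => printTree fuel t pfx' ppfx' m incl) cs
        (PySem.List.sorted cs.keys (fun x => x) false)
        (PySem.List.sorted fs (fun x => x) false) pfx ppfx
      ++ renderFiles (PySem.List.sorted fs (fun x => x) false) pfx ppfx m incl

-- A's duplicated root-level dirs loop (prefix is the literal token, path_prefix is f"{dir_name}/")
def renderRootDirs : DForest → List String → List String → PySem.Dict String String → Bool → List String
  | _, [], _, _, _ => []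
  | cs, d :: ds, rootFiles, m, incl =>
    let isLast := ds.isEmpty && rootFiles.isEmpty
    ((if isLast then "└── " else "├── ") ++ d ++ "/") ::
      ((match cs.find d with
        | some t => printTree t.sz t (if isLast then "    " else "│   ") (d ++ "/") m incl
        | none => []) ++ renderRootDirs cs ds rootFiles m incl)

-- A's duplicated root-level files loop (lookup key is the bare file name)
def renderRootFiles : List String → PySem.Dict String String → Bool → List String
  | [], _, _ => []
  | f :: rest, m, incl =>
    let isLast := rest.isEmpty
    (if incl && m.contains f then
        (if isLast then "└── " else "├── ") ++ f ++ " (path: " ++ m.getD f "" ++ ")"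
      else (if isLast then "└── " else "├── ") ++ f) :: renderRootFiles rest m incl

def get_directory_structure (paths : List String) (include_full_paths : Bool) : String :=
  if paths = [] then "" else
  let m := buildMapping paths
  let t := buildTree paths
  PySem.Str.join "\n"
    (renderRootDirs t.kidsOf (PySem.List.sorted t.kidsOf.keys (fun x => x) false)
        (PySem.List.sorted t.filesOf (fun x => x) false) m include_full_paths
      ++ renderRootFiles (PySem.List.sorted t.filesOf (fun x => x) false) m include_full_paths)

-- ===== PORT B =====

-- files = sorted(e[0] for e in entries if len(e) == 1)
def bSingles (entries : List (List String)) : List String :=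
  entries.filterMap (fun e => match e with | [f] => some f | _ => none)

-- the multiset {e[0] for e in entries if len(e) > 1} before set() dedup
def bHeads (entries : List (List String)) : List String :=
  entries.filterMap (fun e => match e with | x :: _ :: _ => some x | _ => none)

-- [e[1:] for e in entries if len(e) > 1 and e[0] == d]
def bSub (d : String) (entries : List (List String)) : List (List String) :=
  entries.filterMap
    (fun e => match e with | x :: y :: r => if x = d then some (y :: r) else none | _ => none)

-- total number of path components still to be emitted (fuel bound for render)
def muE (entries : List (List String)) : Nat := (entries.map List.length).sum

-- the trailing file loop of render
def fileLoopB : List String → String → String → Bool → List String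
  | [], _, _, _ => []
  | f :: rest, pfx, ppfx, incl =>
    (if incl then
        pfx ++ (if rest.isEmpty then "└── " else "├── ") ++ f ++ " (path: " ++ ppfx ++ f ++ ")"
      else pfx ++ (if rest.isEmpty then "└── " else "├── ") ++ f) :: fileLoopB rest pfx ppfx incl

-- render's dir loop, abstracted over the recursive call on the partition for each head
def dirLoopH (recB : List (List String) → String → String → List String)
    (entries : List (List String)) :
    List String → List String → String → String → List String
  | [], _, _, _ => []
  | d :: ds, files, pfx, ppfx =>
    let last := ds.isEmpty && files.isEmpty
    (pfx ++ (if last then "└── " else "├── ") ++ d ++ "/") ::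
      (recB (bSub d entries) (pfx ++ (if last then "    " else "│   ")) (ppfx ++ d ++ "/")
        ++ dirLoopH recB entries ds files pfx ppfx)

-- render(entries, prefix, path_prefix): dir loop then file loop; the Nat fuel only makes the
-- recursion structural (any fuel > the total component count computes the Python recursion)
def renderB : Nat → List (List String) → String → String → Bool → List String
  | 0, _, _, _, _ => []    -- unreachable when fuel > muE entries
  | fuel + 1, entries, pfx, ppfx, incl =>
    dirLoopH (fun es p q => renderB fuel es p q incl) entries
        (PySem.List.sorted (PySem.Set.ofList (bHeads entries)) (fun x => x) false)
        (PySem.List.sorted (bSingles entries) (fun x => x) false) pfx ppfx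
      ++ fileLoopB (PySem.List.sorted (bSingles entries) (fun x => x) false) pfx ppfx incl

def get_directory_structure_alt (paths : List String) (include_full_paths : Bool) : String :=
  if paths = [] then "" else
  PySem.Str.join "\n"
    (renderB (muE (paths.map pySplit) + 1) (paths.map pySplit) "" "" include_full_paths)

-- ===== PRECONDITION & SPEC =====
-- Pre_ excludes paths that use A's sentinel dict key "_files" as a directory (non-final)
-- component: there the sentinel collides with real data and A raises TypeError/AttributeError on
-- most such inputs, otherwise returning an accidental rendering of a subtree dict as a file list.
def Pre_get_directory_structure (paths : List String) (include_full_paths : Bool) : Prop :=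
  ∀ p ∈ paths, "_files" ∉ (pySplit p).dropLast
instance (paths : List String) (include_full_paths : Bool) :
    Decidable (Pre_get_directory_structure paths include_full_paths) := by
  unfold Pre_get_directory_structure; infer_instance

def pvWitness_get_directory_structure : List String × Bool :=
  (["a/b.py", "c.txt"], true)

def Spec_get_directory_structure (paths : List String) (include_full_paths : Bool) (out : String) : Prop := out = get_directory_structure_alt paths include_full_paths
instance (paths : List String) (include_full_paths : Bool) (out : String) : Decidable (Spec_get_directory_structure paths include_full_paths out) := by unfold Spec_get_directory_structure; infer_instance

-- ===== CLAIM (what is proved, stated in full; the proofs are below) =====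
def Claim_equal_get_directory_structure : Prop := ∀ (paths : List String) (include_full_paths : Bool), Dom_get_directory_structure paths include_full_paths → Pre_get_directory_structure paths include_full_paths → Spec_get_directory_structure paths include_full_paths (get_directory_structure paths include_full_paths)

-- ===== LEMMAS AND PROOFS =====

theorem pvWitness_ok :
    Dom_get_directory_structure pvWitness_get_directory_structure.1 pvWitness_get_directory_structure.2
      ∧ Pre_get_directory_structure pvWitness_get_directory_structure.1 pvWitness_get_directory_structure.2 := by
  decide

-- ---- characterization of A's tree build as B's partition ----

def treeOf (L : List (List String)) : DTree := L.foldl insertPath (.node [] .nil)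

def joinP (e : List String) : String := PySem.Str.join "/" e

theorem treeOf_append (L : List (List String)) (e : List String) :
    treeOf (L ++ [e]) = insertPath (treeOf L) e := by
  simp [treeOf, List.foldl_append]

theorem uf_find : ∀ (cs : DForest) (p : String) (u : DTree → DTree) (d : String),
    (updateForest cs p u).find d
      = if d = p then some (u ((cs.find p).getD (.node [] .nil))) else cs.find d
  | .nil, p, u, d => by
    by_cases hd : d = p
    · subst hd
      simp [updateForest, DForest.find]
    · simp [updateForest, DForest.find, hd, Ne.symm hd]
  | .cons k t r, p, u, d => by
    by_cases hk : k = p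
    · subst hk
      by_cases hd : d = k
      · subst hd
        simp [updateForest, DForest.find]
      · simp [updateForest, DForest.find, hd, Ne.symm hd]
    · by_cases hkd : k = d
      · subst hkd
        simp [updateForest, DForest.find, hk, fun e : k = p => hk e]
      · simp [updateForest, DForest.find, hk, hkd, uf_find r p u d]

theorem filesOf_treeOf (L : List (List String)) : (treeOf L).filesOf = bSingles L := by
  induction L using List.reverseRecOn with
  | nil => rfl
  | append_singleton L e ih =>
    rw [treeOf_append]
    rcases ht : treeOf L with ⟨fs, cs⟩
    rw [ht] at ih
    cases e with
    | nil => simpa [insertPath, bSingles, List.filterMap_append] using ih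
    | cons x t =>
      cases t with
      | nil => simp [insertPath, bSingles, List.filterMap_append, DTree.filesOf] at ih ⊢; simp [ih]
      | cons y r => simpa [insertPath, bSingles, List.filterMap_append, DTree.filesOf] using ih

theorem keys_updateForest : ∀ (cs : DForest) (p : String) (u : DTree → DTree),
    (updateForest cs p u).keys = if p ∈ cs.keys then cs.keys else cs.keys ++ [p]
  | .nil, p, u => by simp [updateForest, DForest.keys]
  | .cons k t r, p, u => by
    simp only [updateForest]
    by_cases hk : k = p
    · subst hk
      rw [if_pos rfl]
      simp [DForest.keys]
    · rw [if_neg hk]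
      simp only [DForest.keys, keys_updateForest r p u]
      have hpk : p ≠ k := fun e => hk e.symm
      have hmem : (p ∈ k :: r.keys) = (p ∈ r.keys) := by
        simp [List.mem_cons, hpk]
      by_cases hp : p ∈ r.keys
      · simp [hp, hmem]
      · simp [hp, hmem]

theorem keys_treeOf (L : List (List String)) :
    ((treeOf L).kidsOf).keys = PySem.Set.ofList (bHeads L) := by
  induction L using List.reverseRecOn with
  | nil => rfl
  | append_singleton L e ih =>
    rw [treeOf_append]
    rcases ht : treeOf L with ⟨fs, cs⟩
    rw [ht] at ih
    cases e with
    | nil => simpa [insertPath, bHeads, List.filterMap_append] using ih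
    | cons x t =>
      cases t with
      | nil => simpa [insertPath, bHeads, List.filterMap_append, DTree.kidsOf] using ih
      | cons y r =>
        simp only [insertPath, bHeads, List.filterMap_append, List.filterMap_cons,
          List.filterMap_nil, DTree.kidsOf] at ih ⊢
        rw [keys_updateForest, ih, PySem.Set.ofList_append_singleton,
          PySem.Set.add_eq_ite]

theorem bSub_of_not_mem (d : String) : ∀ (L : List (List String)), d ∉ bHeads L → bSub d L = []
  | [], _ => rfl
  | e :: L, h => by
    cases e with
    | nil =>
      simp only [bHeads, List.filterMap_cons] at h
      simpa [bSub, List.filterMap_cons] using bSub_of_not_mem d L h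
    | cons x t =>
      cases t with
      | nil =>
        simp only [bHeads, List.filterMap_cons] at h
        simpa [bSub, List.filterMap_cons] using bSub_of_not_mem d L h
      | cons y r =>
        simp only [bHeads, List.filterMap_cons, List.mem_cons] at h
        push_neg at h
        have hx : ¬ x = d := fun e => h.1 e.symm
        simpa [bSub, List.filterMap_cons, hx] using bSub_of_not_mem d L h.2

theorem find_treeOf (L : List (List String)) (d : String) :
    ((treeOf L).kidsOf).find d
      = if d ∈ bHeads L then some (treeOf (bSub d L)) else none := by
  induction L using List.reverseRecOn with
  | nil => simp [treeOf, DTree.kidsOf, DForest.find, bHeads]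
  | append_singleton L e ih =>
    rw [treeOf_append]
    rcases ht : treeOf L with ⟨fs, cs⟩
    rw [ht] at ih
    cases e with
    | nil => simpa [insertPath, bHeads, bSub, List.filterMap_append] using ih
    | cons x t =>
      cases t with
      | nil => simpa [insertPath, bHeads, bSub, List.filterMap_append, DTree.kidsOf] using ih
      | cons y r =>
        simp only [insertPath, DTree.kidsOf] at ih ⊢
        rw [uf_find]
        by_cases hdx : d = x
        · subst hdx
          rw [if_pos rfl]
          have hmem : d ∈ bHeads (L ++ [d :: y :: r]) := by
            simp [bHeads, List.filterMap_append, List.filterMap_cons]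
          rw [if_pos hmem]
          have hsub : bSub d (L ++ [d :: y :: r]) = bSub d L ++ [y :: r] := by
            simp [bSub, List.filterMap_append, List.filterMap_cons]
          rw [hsub, treeOf_append]
          by_cases hd : d ∈ bHeads L
          · rw [ih, if_pos hd]
            rfl
          · rw [ih, if_neg hd]
            rw [bSub_of_not_mem d L hd]
            rfl
        · rw [if_neg hdx]
          have hheads : d ∈ bHeads (L ++ [x :: y :: r]) ↔ d ∈ bHeads L := by
            simp [bHeads, List.filterMap_append, List.filterMap_cons, hdx]
          have hsub : bSub d (L ++ [x :: y :: r]) = bSub d L := by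
            have hx : ¬ x = d := fun e => hdx e.symm
            simp [bSub, List.filterMap_append, List.filterMap_cons, hx]
          by_cases hd : d ∈ bHeads L
          · rw [if_pos (hheads.mpr hd), hsub, ih, if_pos hd]
          · rw [if_neg (fun hc => hd (hheads.mp hc)), ih, if_neg hd]

-- ---- membership facts about the partition ----

theorem mem_bSingles (L : List (List String)) (f : String) (h : f ∈ bSingles L) : [f] ∈ L := by
  simp only [bSingles, List.mem_filterMap] at h
  obtain ⟨e, he, hm⟩ := h
  cases e with
  | nil => simp at hm
  | cons x t =>
    cases t with
    | nil => simp at hm; subst hm; exact he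
    | cons y r => simp at hm

theorem mem_bSub (d : String) (L : List (List String)) (e' : List String)
    (h : e' ∈ bSub d L) : (d :: e') ∈ L ∧ e' ≠ [] := by
  simp only [bSub, List.mem_filterMap] at h
  obtain ⟨e, he, hm⟩ := h
  cases e with
  | nil => simp at hm
  | cons x t =>
    cases t with
    | nil => simp at hm
    | cons y r =>
      by_cases hx : x = d
      · subst hx
        simp at hm
        cases hm
        exact ⟨he, by simp⟩
      · simp [hx] at hm

-- ---- split/join facts ----

theorem go_splitOn : ∀ (fuel : Nat) (l cur : List Char) (acc : List (List Char)), l.length < fuel →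
    PySem.Chars.splitOn.go ['/'] fuel l cur acc
      = acc.reverse ++ (l.splitOn '/').modifyHead (fun a => cur.reverse ++ a)
  | 0, l, cur, acc, h => by omega
  | fuel + 1, [], cur, acc, _ => by
    simp [PySem.Chars.splitOn.go, List.splitOn, List.splitOnP_nil, List.modifyHead]
  | fuel + 1, c :: rest, cur, acc, h => by
    have hrest : rest.length < fuel := by simpa using h
    rcases hX : rest.splitOn '/' with _ | ⟨hd, tl⟩
    · exact absurd hX (List.splitOnP_ne_nil _ _)
    by_cases hc : c = '/'
    · subst hc
      have hpre : List.isPrefixOf ['/'] ('/' :: rest) = true := by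
        simp [List.isPrefixOf]
      have hstep : PySem.Chars.splitOn.go ['/'] (fuel + 1) ('/' :: rest) cur acc
          = PySem.Chars.splitOn.go ['/'] fuel rest [] (cur.reverse :: acc) := by
        simp [PySem.Chars.splitOn.go, hpre]
      rw [hstep, go_splitOn fuel rest [] (cur.reverse :: acc) hrest, hX]
      have hsplit : ('/' :: rest).splitOn '/' = [] :: rest.splitOn '/' := by
        simp [List.splitOn, List.splitOnP_cons]
      rw [hsplit, hX]
      simp [List.modifyHead]
    · have hpre : List.isPrefixOf ['/'] (c :: rest) = false := by
        simp [List.isPrefixOf]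
        exact fun e => hc e.symm
      have hstep : PySem.Chars.splitOn.go ['/'] (fuel + 1) (c :: rest) cur acc
          = PySem.Chars.splitOn.go ['/'] fuel rest (c :: cur) acc := by
        simp [PySem.Chars.splitOn.go, hpre]
      rw [hstep, go_splitOn fuel rest (c :: cur) acc hrest, hX]
      have hsplit : (c :: rest).splitOn '/' = (hd :: tl).modifyHead (fun a => c :: a) := by
        rw [← hX]
        simp only [List.splitOn, List.splitOnP_cons, beq_iff_eq, hc, if_neg, not_false_iff]
      rw [hsplit]
      simp [List.modifyHead]

theorem chars_splitOn_eq (s : List Char) :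
    PySem.Chars.splitOn s ['/'] = s.splitOn '/' := by
  rw [PySem.Chars.splitOn, go_splitOn (s.length + 1) s [] [] (Nat.lt_succ_self _)]
  rcases hX : s.splitOn '/' with _ | ⟨hd, tl⟩
  · exact absurd hX (List.splitOnP_ne_nil _ _)
  · simp [List.modifyHead]

theorem pySplit_eq (p : String) :
    pySplit p = (p.toList.splitOn '/').map String.ofList := by
  have hsep : ("/" : String).toList = ['/'] := rfl
  simp [pySplit, PySem.Str.split?, PySem.Chars.split?, hsep, chars_splitOn_eq]

theorem pySplit_ne_nil (p : String) : pySplit p ≠ [] := by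
  rw [pySplit_eq]
  intro h
  exact List.splitOnP_ne_nil _ _ (List.map_eq_nil_iff.mp h)

theorem joinP_pySplit (p : String) : joinP (pySplit p) = p := by
  rw [← String.toList_inj]
  rw [pySplit_eq, joinP]
  have hsep : ("/" : String).toList = ['/'] := rfl
  simp only [PySem.Str.join, String.toList_ofList, hsep]
  have hmap : (List.map String.ofList (p.toList.splitOn '/')).map String.toList
      = p.toList.splitOn '/' := by
    simp [List.map_map, Function.comp_def]
  rw [hmap]
  exact List.intercalate_splitOn p.toList '/'

theorem joinP_cons (x : String) (t : List String) (h : t ≠ []) :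
    joinP (x :: t) = x ++ "/" ++ joinP t := by
  rcases t with _ | ⟨y, r⟩
  · exact absurd rfl h
  · rw [← String.toList_inj]
    simp only [joinP, PySem.Str.join, String.toList_ofList, List.map_cons,
      String.toList_append, PySem.Chars.join_cons_cons]

theorem joinP_single (x : String) : joinP [x] = x := by
  rw [← String.toList_inj]
  simp [joinP, PySem.Str.join, PySem.Chars.join_singleton]

-- ---- the path_mapping maps every inserted full path to itself ----

theorem key_eq_joinP : ∀ (parts : List String), parts ≠ [] →
    (if parts.length - 1 > 0 then
        PySem.Str.join "/" (parts.take (parts.length - 1)) ++ "/"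
          ++ parts.getD (parts.length - 1) ""
      else parts.getD 0 "") = joinP parts
  | [], h => absurd rfl h
  | [x], _ => by simp [joinP_single]
  | x :: y :: r, _ => by
    have ih := key_eq_joinP (y :: r) (by simp)
    have hx1 : PySem.Str.join "/" [x] = x := joinP_single x
    have hcons : joinP (x :: y :: r) = x ++ "/" ++ joinP (y :: r) :=
      joinP_cons x (y :: r) (by simp)
    cases r with
    | nil =>
      have hy : joinP [y] = y := joinP_single y
      simp only [List.length_cons, List.length_nil] at *
      simp [List.take, hx1, hcons, hy, String.append_assoc]
    | cons z r' =>
      have hlen : (x :: y :: z :: r').length - 1 = (y :: z :: r').length := by simp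
      rw [hlen, if_pos (by simp)]
      have htake : (x :: y :: z :: r').take (y :: z :: r').length
          = x :: (y :: z :: r').take ((y :: z :: r').length - 1) := by
        simp [List.take_succ_cons]
      rw [htake]
      have hT : (y :: z :: r').take ((y :: z :: r').length - 1) ≠ [] := by
        simp [List.take_succ_cons]
      have hjoin : PySem.Str.join "/" (x :: (y :: z :: r').take ((y :: z :: r').length - 1))
          = x ++ "/" ++ PySem.Str.join "/" ((y :: z :: r').take ((y :: z :: r').length - 1)) :=
        joinP_cons x _ hT
      rw [hjoin]
      have hget : (x :: y :: z :: r').getD (y :: z :: r').length ""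
          = (y :: z :: r').getD ((y :: z :: r').length - 1) "" := by
        simp [List.getD]
      rw [hget]
      rw [if_pos (by simp)] at ih
      rw [hcons, ← ih]
      simp [String.append_assoc, joinP]

theorem buildMapping_aux : ∀ (paths : List String) (d : PySem.Dict String String),
    paths.foldl
        (fun d p =>
          let parts := pySplit p
          let key :=
            if parts.length - 1 > 0 then
              PySem.Str.join "/" (parts.take (parts.length - 1)) ++ "/"
                ++ parts.getD (parts.length - 1) ""
            else parts.getD 0 ""
          d.insert key p) d
      = paths.foldl (fun d p => d.insert p p) d
  | [], d => rfl
  | p :: ps, d => by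
    simp only [List.foldl_cons]
    have hkey : (if (pySplit p).length - 1 > 0 then
          PySem.Str.join "/" ((pySplit p).take ((pySplit p).length - 1)) ++ "/"
            ++ (pySplit p).getD ((pySplit p).length - 1) ""
        else (pySplit p).getD 0 "") = p := by
      rw [key_eq_joinP (pySplit p) (pySplit_ne_nil p), joinP_pySplit]
    rw [show (let parts := pySplit p
        let key :=
          if parts.length - 1 > 0 then
            PySem.Str.join "/" (parts.take (parts.length - 1)) ++ "/"
              ++ parts.getD (parts.length - 1) ""
          else parts.getD 0 ""
        d.insert key p) = d.insert p p from by rw [show (let parts := pySplit p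
          let key :=
            if parts.length - 1 > 0 then
              PySem.Str.join "/" (parts.take (parts.length - 1)) ++ "/"
                ++ parts.getD (parts.length - 1) ""
            else parts.getD 0 ""
          d.insert key p) = d.insert (if (pySplit p).length - 1 > 0 then
            PySem.Str.join "/" ((pySplit p).take ((pySplit p).length - 1)) ++ "/"
              ++ (pySplit p).getD ((pySplit p).length - 1) ""
          else (pySplit p).getD 0 "") p from rfl, hkey]]
    exact buildMapping_aux ps (d.insert p p)

theorem buildMapping_eq (paths : List String) :
    buildMapping paths = paths.foldl (fun d p => d.insert p p) PySem.Dict.empty :=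
  buildMapping_aux paths PySem.Dict.empty

theorem insSelf_getD : ∀ (l : List String) (d : PySem.Dict String String),
    (∀ k, d.contains k = true → d.getD k "" = k) →
    ∀ k, (l.foldl (fun d p => d.insert p p) d).contains k = true →
      (l.foldl (fun d p => d.insert p p) d).getD k "" = k
  | [], d, hd, k, hk => hd k hk
  | p :: ps, d, hd, k, hk => by
    refine insSelf_getD ps (d.insert p p) ?_ k hk
    intro k' hk'
    by_cases he : k' = p
    · subst he
      rw [PySem.Dict.getD_insert_self]
    · rw [PySem.Dict.getD_insert, if_neg he]
      refine hd k' ?_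
      rw [PySem.Dict.contains_insert] at hk'
      simpa [he] using hk'

theorem insSelf_contains_mono : ∀ (l : List String) (d : PySem.Dict String String) (k : String),
    d.contains k = true → (l.foldl (fun d p => d.insert p p) d).contains k = true
  | [], _, _, h => h
  | p :: ps, d, k, h => by
    refine insSelf_contains_mono ps (d.insert p p) k ?_
    rw [PySem.Dict.contains_insert, h]
    simp

theorem insSelf_contains : ∀ (l : List String) (d : PySem.Dict String String) (k : String),
    k ∈ l → (l.foldl (fun d p => d.insert p p) d).contains k = true
  | [], _, _, h => absurd h (by simp)
  | p :: ps, d, k, h => by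
    rcases List.mem_cons.mp h with h1 | h1
    · subst h1
      exact insSelf_contains_mono ps (d.insert k k) k (PySem.Dict.contains_insert_self _ _ _)
    · exact insSelf_contains ps (d.insert p p) k h1

theorem mapping_spec (paths : List String) (k : String) (h : k ∈ paths) :
    (buildMapping paths).contains k = true ∧ (buildMapping paths).getD k "" = k := by
  rw [buildMapping_eq]
  refine ⟨insSelf_contains paths PySem.Dict.empty k h, ?_⟩
  refine insSelf_getD paths PySem.Dict.empty ?_ k (insSelf_contains paths PySem.Dict.empty k h)
  intro k' hk'
  simp at hk'

-- ---- termination-bound lemmas for the fuels ----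

theorem sz_pos (t : DTree) : 1 ≤ t.sz := by
  rcases t with ⟨fs, cs⟩
  simp only [DTree.sz]
  omega

-- a found child is smaller than its forest
theorem DForest.find_sz : ∀ (cs : DForest) (d : String) (t : DTree),
    cs.find d = some t → t.sz < cs.szF
  | .nil, _, _, h => by simp [DForest.find] at h
  | .cons k t' r, d, t, h => by
    simp only [DForest.find] at h
    split at h
    · cases h; simp only [DForest.szF]; omega
    · have := DForest.find_sz r d t h; simp only [DForest.szF]; omega

theorem muE_bSub_le (d : String) : ∀ (L : List (List String)), muE (bSub d L) ≤ muE L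
  | [] => le_refl _
  | e :: L => by
    have ih := muE_bSub_le d L
    rcases e with _ | ⟨x, _ | ⟨y, r⟩⟩
    · have h : bSub d ([] :: L) = bSub d L := by simp [bSub]
      rw [h]
      calc muE (bSub d L) ≤ muE L := ih
        _ ≤ muE ([] :: L) := by simp [muE]
    · have h : bSub d ([x] :: L) = bSub d L := by simp [bSub]
      rw [h]
      calc muE (bSub d L) ≤ muE L := ih
        _ ≤ muE ([x] :: L) := by simp [muE]
    · by_cases hx : x = d
      · subst hx
        have h : bSub x ((x :: y :: r) :: L) = (y :: r) :: bSub x L := by simp [bSub]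
        rw [h]
        simp only [muE, List.map_cons, List.sum_cons, List.length_cons] at ih ⊢
        omega
      · have h : bSub d ((x :: y :: r) :: L) = bSub d L := by simp [bSub, hx]
        rw [h]
        calc muE (bSub d L) ≤ muE L := ih
          _ ≤ muE ((x :: y :: r) :: L) := by simp [muE]

theorem muE_bSub_lt (d : String) : ∀ (L : List (List String)), d ∈ bHeads L → muE (bSub d L) < muE L
  | [], h => by simp [bHeads] at h
  | e :: L, h => by
    have hle := muE_bSub_le d L
    rcases e with _ | ⟨x, _ | ⟨y, r⟩⟩
    · simp only [bHeads, List.filterMap_cons] at h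
      have h2 := muE_bSub_lt d L h
      have h3 : bSub d ([] :: L) = bSub d L := by simp [bSub]
      rw [h3]
      calc muE (bSub d L) < muE L := h2
        _ ≤ muE ([] :: L) := by simp [muE]
    · simp only [bHeads, List.filterMap_cons] at h
      have h2 := muE_bSub_lt d L h
      have h3 : bSub d ([x] :: L) = bSub d L := by simp [bSub]
      rw [h3]
      calc muE (bSub d L) < muE L := h2
        _ ≤ muE ([x] :: L) := by simp [muE]
    · by_cases hx : x = d
      · subst hx
        have h3 : bSub x ((x :: y :: r) :: L) = (y :: r) :: bSub x L := by simp [bSub]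
        rw [h3]
        simp only [muE, List.map_cons, List.sum_cons, List.length_cons] at hle ⊢
        omega
      · simp only [bHeads, List.filterMap_cons] at h
        rcases List.mem_cons.mp h with h1 | h1
        · exact absurd h1.symm hx
        · have h2 := muE_bSub_lt d L h1
          have h3 : bSub d ((x :: y :: r) :: L) = bSub d L := by simp [bSub, hx]
          rw [h3]
          calc muE (bSub d L) < muE L := h2
            _ ≤ muE ((x :: y :: r) :: L) := by simp [muE]

theorem mem_bHeads_of_mem_sortedDirs (L : List (List String)) (d : String)
    (h : d ∈ PySem.List.sorted (PySem.Set.ofList (bHeads L)) (fun x => x) false) :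
    d ∈ bHeads L := by
  have h1 := (PySem.List.sorted_perm (PySem.Set.ofList (bHeads L)) (fun x => x) false).mem_iff.mp h
  rwa [PySem.Set.mem_ofList] at h1

-- ---- the two renderers agree ----

theorem if_prefix (ppfx f : String) : (if ppfx ≠ "" then ppfx ++ f else f) = ppfx ++ f := by
  split_ifs with h
  · rfl
  · push_neg at h
    subst h
    simp

theorem if_prefix2 (ppfx d : String) :
    (if ppfx ≠ "" then ppfx ++ d ++ "/" else d ++ "/") = ppfx ++ d ++ "/" := by
  split_ifs with h
  · rfl
  · push_neg at h
    subst h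
    simp

theorem renderFiles_eq (fs : List String) (pfx ppfx : String) (m : PySem.Dict String String)
    (incl : Bool)
    (h : ∀ f ∈ fs, m.contains (ppfx ++ f) = true ∧ m.getD (ppfx ++ f) "" = ppfx ++ f) :
    renderFiles fs pfx ppfx m incl = fileLoopB fs pfx ppfx incl := by
  induction fs with
  | nil => rfl
  | cons f rest ih =>
    have hf := h f (List.mem_cons_self ..)
    have hrest := fun g hg => h g (List.mem_cons_of_mem _ hg)
    simp only [renderFiles, fileLoopB, if_prefix, hf.1, hf.2, ih hrest]
    cases incl <;> simp [String.append_assoc]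

theorem renderDirsH_congr (r1 r2 : DTree → String → String → List String) (cs : DForest) :
    ∀ (ds files : List String) (pfx ppfx : String),
    (∀ d ∈ ds, ∀ t, cs.find d = some t → ∀ a b, r1 t a b = r2 t a b) →
    renderDirsH r1 cs ds files pfx ppfx = renderDirsH r2 cs ds files pfx ppfx := by
  intro ds
  induction ds with
  | nil => intro _ _ _ _; rfl
  | cons d ds' ih =>
    intro files pfx ppfx h
    simp only [renderDirsH]
    refine congr_arg₂ (· :: ·) rfl (congr_arg₂ (· ++ ·) ?_ ?_)
    · cases hfd : cs.find d with
      | some t => exact h d (List.mem_cons_self ..) t hfd _ _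
      | none => rfl
    · exact ih files pfx ppfx (fun x hx => h x (List.mem_cons_of_mem _ hx))

theorem printTree_irrel : ∀ (f1 : Nat) (t : DTree) (f2 : Nat) (pfx ppfx : String)
    (m : PySem.Dict String String) (incl : Bool), t.sz ≤ f1 → t.sz ≤ f2 →
    printTree f1 t pfx ppfx m incl = printTree f2 t pfx ppfx m incl := by
  intro f1
  induction f1 with
  | zero =>
    intro t f2 pfx ppfx m incl h1 _
    exact absurd (le_trans (sz_pos t) h1) (by omega)
  | succ a ih =>
    intro t f2 pfx ppfx m incl h1 h2
    rcases t with ⟨fs, cs⟩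
    rcases f2 with _ | b
    · exact absurd (le_trans (sz_pos (DTree.node fs cs)) h2) (by omega)
    simp only [printTree]
    refine congr_arg₂ (· ++ ·) ?_ rfl
    apply renderDirsH_congr
    intro d _ t hfd a' b'
    have hsz := DForest.find_sz cs d t hfd
    simp only [DTree.sz] at h1 h2
    exact ih t b a' b' m incl (by omega) (by omega)

theorem render_main : ∀ (N : Nat) (L : List (List String)) (pfx ppfx : String)
    (m : PySem.Dict String String) (incl : Bool) (fA fB : Nat), muE L ≤ N →
    (treeOf L).sz ≤ fA → muE L < fB →
    (∀ e ∈ L, e ≠ []) →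
    (∀ e ∈ L, m.contains (ppfx ++ joinP e) = true ∧ m.getD (ppfx ++ joinP e) "" = ppfx ++ joinP e) →
    printTree fA (treeOf L) pfx ppfx m incl = renderB fB L pfx ppfx incl := by
  intro N
  induction N with
  | zero =>
    intro L pfx ppfx m incl fA fB hN hfA hfB hne _
    have hL : L = [] := by
      cases L with
      | nil => rfl
      | cons e L' =>
        have h1 := hne e (List.mem_cons_self ..)
        have h2 : 1 ≤ e.length := by
          cases e with
          | nil => exact absurd rfl h1
          | cons a b => simp
        simp only [muE, List.map_cons, List.sum_cons, Nat.le_zero] at hN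
        omega
    subst hL
    have h0 : treeOf ([] : List (List String)) = DTree.node [] DForest.nil := rfl
    rw [h0] at hfA ⊢
    rcases fA with _ | a
    · exact absurd (le_trans (sz_pos _) hfA) (by omega)
    rcases fB with _ | b
    · omega
    simp [printTree, renderB, DForest.keys, bHeads, bSingles, PySem.Set.ofList_nil,
      PySem.List.sorted, renderDirsH, dirLoopH, renderFiles, fileLoopB]
  | succ N ihN =>
    intro L pfx ppfx m incl fA fB hN hfA hfB hne hm
    rcases ht : treeOf L with ⟨fs, cs⟩
    have hfs : fs = bSingles L := by
      have := filesOf_treeOf L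
      rw [ht] at this
      exact this
    have hkeys : cs.keys = PySem.Set.ofList (bHeads L) := by
      have := keys_treeOf L
      rw [ht] at this
      exact this
    have hfindL : ∀ d ∈ bHeads L, cs.find d = some (treeOf (bSub d L)) := by
      intro d hd
      have := find_treeOf L d
      rw [ht] at this
      simpa [DTree.kidsOf, if_pos hd] using this
    rw [ht] at hfA
    rcases fA with _ | a
    · exact absurd (le_trans (sz_pos _) hfA) (by omega)
    rcases fB with _ | b
    · omega
    simp only [printTree, renderB]
    rw [hkeys, hfs]
    have hfiles : renderFiles (PySem.List.sorted (bSingles L) (fun x => x) false) pfx ppfx m incl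
        = fileLoopB (PySem.List.sorted (bSingles L) (fun x => x) false) pfx ppfx incl := by
      apply renderFiles_eq
      intro f hf
      have hf' : f ∈ bSingles L := (PySem.List.sorted_perm _ _ _).mem_iff.mp hf
      have := hm [f] (mem_bSingles L f hf')
      rwa [joinP_single] at this
    have inner : ∀ (ds : List String), (∀ d ∈ ds, d ∈ bHeads L) → ∀ (files' : List String),
        renderDirsH (fun t pfx' ppfx' => printTree a t pfx' ppfx' m incl) cs ds files' pfx ppfx
          = dirLoopH (fun es p q => renderB b es p q incl) L ds files' pfx ppfx := by
      intro ds
      induction ds with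
      | nil => intro _ _; rfl
      | cons d ds' ihds =>
        intro hds files'
        have hdh : d ∈ bHeads L := hds d (List.mem_cons_self ..)
        simp only [renderDirsH, dirLoopH, hfindL d hdh]
        refine congr_arg₂ (· :: ·) rfl (congr_arg₂ (· ++ ·) ?_
          (ihds (fun x hx => hds x (List.mem_cons_of_mem _ hx)) files'))
        rw [if_prefix2]
        have hsz : (treeOf (bSub d L)).sz ≤ a := by
          have h1 := DForest.find_sz cs d _ (hfindL d hdh)
          simp only [DTree.sz] at hfA
          omega
        have hmu : muE (bSub d L) < b := by
          have := muE_bSub_lt d L hdh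
          omega
        refine ihN (bSub d L) _ (ppfx ++ d ++ "/") m incl a b ?_ hsz hmu ?_ ?_
        · have := muE_bSub_lt d L hdh
          omega
        · intro e' he'
          exact (mem_bSub d L e' he').2
        · intro e' he'
          obtain ⟨hmem, hne'⟩ := mem_bSub d L e' he'
          have hj := hm (d :: e') hmem
          rw [joinP_cons d e' hne'] at hj
          have ha : ppfx ++ d ++ "/" ++ joinP e' = ppfx ++ (d ++ "/" ++ joinP e') := by
            simp [String.append_assoc]
          rw [ha]
          exact hj
    rw [hfiles, inner (PySem.List.sorted (PySem.Set.ofList (bHeads L)) (fun x => x) false)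
      (fun d hd => mem_bHeads_of_mem_sortedDirs L d hd) _]

-- ---- root-level loops are printTree at the empty prefixes ----

theorem rootFiles_eq (fs : List String) (m : PySem.Dict String String) (incl : Bool) :
    renderRootFiles fs m incl = renderFiles fs "" "" m incl := by
  induction fs with
  | nil => rfl
  | cons f rest ih => simp [renderRootFiles, renderFiles, ih]

theorem rootDirs_eq (F : Nat) (cs : DForest) (m : PySem.Dict String String) (incl : Bool)
    (hF : ∀ (d : String) (t : DTree), cs.find d = some t → t.sz ≤ F) :
    ∀ (dirs files : List String),
    renderRootDirs cs dirs files m incl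
      = renderDirsH (fun t a b => printTree F t a b m incl) cs dirs files "" "" := by
  intro dirs
  induction dirs with
  | nil => intro files; rfl
  | cons d ds ih =>
    intro files
    simp only [renderRootDirs, renderDirsH]
    refine congr_arg₂ (· :: ·) (by simp) (congr_arg₂ (· ++ ·) ?_ (ih files))
    cases hfd : cs.find d with
    | some t =>
      have := printTree_irrel t.sz t F (if ds.isEmpty && files.isEmpty then "    " else "│   ")
        (d ++ "/") m incl (le_refl _) (hF d t hfd)
      simp only [this]
      have he : (if ("" : String) ≠ "" then "" ++ d ++ "/" else d ++ "/") = d ++ "/" := by simp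
      have he2 : ("" : String) ++ (if ds.isEmpty && files.isEmpty then "    " else "│   ")
          = (if ds.isEmpty && files.isEmpty then "    " else "│   ") := by simp
      rw [he, he2]
    | none => rfl

theorem buildTree_eq (paths : List String) : buildTree paths = treeOf (paths.map pySplit) := by
  simp [buildTree, treeOf, List.foldl_map]

-- ===== VERDICT (by name: the statement is the Claim_ definition above) =====
theorem get_directory_structure_spec : Claim_equal_get_directory_structure := by
  intro paths incl _ _
  unfold Spec_get_directory_structure
  unfold get_directory_structure get_directory_structure_alt
  by_cases hp : paths = []
  · simp [hp]
  · simp only [if_neg hp]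
    rw [buildTree_eq]
    have hne : ∀ e ∈ paths.map pySplit, e ≠ [] := by
      intro e he
      obtain ⟨p, _, hpe⟩ := List.mem_map.mp he
      exact hpe ▸ pySplit_ne_nil p
    have hm : ∀ e ∈ paths.map pySplit,
        (buildMapping paths).contains ("" ++ joinP e) = true
          ∧ (buildMapping paths).getD ("" ++ joinP e) "" = "" ++ joinP e := by
      intro e he
      obtain ⟨p, hpp, hpe⟩ := List.mem_map.mp he
      subst hpe
      have h0 : ("" : String) ++ joinP (pySplit p) = joinP (pySplit p) := by simp
      rw [h0, joinP_pySplit]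
      exact mapping_spec paths p hpp
    rcases ht : treeOf (paths.map pySplit) with ⟨fs, cs⟩
    have hmain := render_main (muE (paths.map pySplit)) (paths.map pySplit) "" ""
      (buildMapping paths) incl (DForest.szF cs + fs.length + 1) (muE (paths.map pySplit) + 1)
      (le_refl _) (by rw [ht]; simp [DTree.sz]) (Nat.lt_succ_self _) hne hm
    rw [ht] at hmain
    simp only [printTree] at hmain
    simp only [DTree.kidsOf, DTree.filesOf]
    rw [rootDirs_eq (DForest.szF cs + fs.length) cs (buildMapping paths) incl
      (fun d t hfd => by have := DForest.find_sz cs d t hfd; omega), rootFiles_eq]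
    rw [hmain]
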